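-- pv_equiv track=rewrite | github.com/rajmohanutopai/dina | scripts/tag_test_code.py | find_match
-- ===== SOURCE A (Python) =====
-- def find_match(numbers, valid_paths, id_by_path_row, rows_by_path):
--     """Find best (path, [ids]) match for extracted numbers.
--
--     Returns (path, [ids]):
--       - Single ID for standalone tests (specific scenario)
--       - All IDs for the path for table-driven tests (covers a subsection)
--       - (None, []) if no match
--     """
--     if not numbers:
--         return None, []
--
--     section = str(numbers[0])
--     rest = numbers[1:]
--
--     best_with_scenario = None  # (path, [id], path_depth)
--     best_without_scenario = None  # (path, [ids])
--
--     for split in range(len(rest) + 1):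
--         path_parts = [section] + [str(n) for n in rest[:split]]
--         path = ".".join(path_parts)
--         remaining = rest[split:]
--
--         if path not in valid_paths:
--             continue
--
--         if remaining:
--             scenario = remaining[0]
--             tag_id = id_by_path_row.get((path, scenario))
--             if tag_id:
--                 depth = len(path_parts)
--                 if best_with_scenario is None or depth > best_with_scenario[2]:
--                     best_with_scenario = (path, [tag_id], depth)
--         else:
--             if best_without_scenario is None:
--                 ids = [tid for _, tid in rows_by_path.get(path, [])]
--                 best_without_scenario = (path, ids)
--
--     if best_with_scenario:
--         return best_with_scenario[0], best_with_scenario[1]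
--     if best_without_scenario:
--         return best_without_scenario[0], best_without_scenario[1]
--     return None, []
-- ===== SOURCE B (Python) =====
-- def find_match(numbers, valid_paths, id_by_path_row, rows_by_path):
--     """Find best (path, [ids]) match for extracted numbers.
--
--     Builds the dotted prefix strings incrementally (one concatenation per
--     number instead of re-joining per split), then scans candidate scenario
--     splits from deepest to shallowest with an early return; the full-path
--     (table-driven) lookup is only a fallback when no scenario matches.
--     """
--     if not numbers:
--         return None, []
--
--     cur = str(numbers[0])
--     prefixes = [cur]
--     rest = numbers[1:]
--     for n in rest:
--         cur = cur + "." + str(n)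
--         prefixes.append(cur)
--
--     for split in range(len(rest) - 1, -1, -1):
--         path = prefixes[split]
--         if path in valid_paths:
--             tag_id = id_by_path_row.get((path, rest[split]))
--             if tag_id:
--                 return path, [tag_id]
--
--     if cur in valid_paths:
--         return cur, [tid for _, tid in rows_by_path.get(cur, [])]
--     return None, []
-- ===== Notes on version B (the rewrite author's own statement) =====
-- stated objective: faster
-- what changed: Replaces A's forward loop with two accumulators (max-depth best_with_scenario, first best_without_scenario) and per-split re-joining of the path string by an incremental prefix-string build followed by a deepest-first scan with early return for scenario matches and a single full-path fallback; each prefix is built by one concatenation instead of a fresh join over all parts.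
import Mathlib
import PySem

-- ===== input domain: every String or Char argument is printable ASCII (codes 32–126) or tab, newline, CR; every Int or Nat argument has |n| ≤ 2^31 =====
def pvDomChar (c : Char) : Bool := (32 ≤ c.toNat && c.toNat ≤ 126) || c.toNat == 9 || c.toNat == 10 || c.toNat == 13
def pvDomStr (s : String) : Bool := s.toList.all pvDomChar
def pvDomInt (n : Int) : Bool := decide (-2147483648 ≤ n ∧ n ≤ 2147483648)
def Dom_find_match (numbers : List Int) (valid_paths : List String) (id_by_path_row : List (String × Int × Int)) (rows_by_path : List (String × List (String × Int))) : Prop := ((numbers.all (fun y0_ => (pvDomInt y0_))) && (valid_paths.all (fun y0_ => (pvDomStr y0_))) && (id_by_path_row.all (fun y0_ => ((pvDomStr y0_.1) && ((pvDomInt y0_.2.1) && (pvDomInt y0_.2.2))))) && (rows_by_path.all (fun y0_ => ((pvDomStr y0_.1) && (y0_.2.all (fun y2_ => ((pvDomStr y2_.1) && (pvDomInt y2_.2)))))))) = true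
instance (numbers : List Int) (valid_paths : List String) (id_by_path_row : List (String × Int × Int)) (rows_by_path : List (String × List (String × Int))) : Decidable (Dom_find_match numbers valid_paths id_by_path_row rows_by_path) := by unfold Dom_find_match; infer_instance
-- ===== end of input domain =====

-- B builds the dotted prefix strings incrementally and scans scenario splits deepest-first
-- with an early return, instead of A's forward loop with per-split re-joining and two
-- best-so-far accumulators (objective: alternative decomposition; return value proved equal).

-- ===== PORT A =====
-- shared data-representation helpers: the Python dicts `id_by_path_row` (keyed by the
-- (path, scenario) pair) and `rows_by_path`, flattened to the given list types;
-- `.get(...)` = first-match lookup (both Pythons perform the identical lookup)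
def getTag (d : List (String × Int × Int)) (p : String) (s : Int) : Option Int :=
  (PySem.Dict.mk (d.map (fun e => ((e.1, e.2.1), e.2.2)))).get? (p, s)

def getRows (d : List (String × List (String × Int))) (p : String) : List (String × Int) :=
  (PySem.Dict.mk d).getD p []

-- A's loop body for one value of `split` (state = (best_with_scenario, best_without_scenario))
def stepA (valid_paths : List String) (id_by_path_row : List (String × Int × Int))
    (rows_by_path : List (String × List (String × Int))) (sec : String) (rest : List Int)
    (st : Option (String × List Int × Int) × Option (String × List Int)) (split : Int) :
    Option (String × List Int × Int) × Option (String × List Int) :=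
  let pathParts := sec :: (PySem.List.slice rest (some 0) (some split)).map PySem.Int.toStr
  let path := PySem.Str.join "." pathParts
  let remaining := PySem.List.slice rest (some split) none
  if valid_paths.contains path then
    match remaining with
    | scenario :: _ =>
      match getTag id_by_path_row path scenario with
      | some tid =>
        if tid ≠ 0 then
          let depth : Int := pathParts.length
          match st.1 with
          | none => (some (path, [tid], depth), st.2)
          | some b => if depth > b.2.2 then (some (path, [tid], depth), st.2) else st
        else st
      | none => st
    | [] =>
      match st.2 with
      | none => (st.1, some (path, (getRows rows_by_path path).map (·.2)))
      | some _ => st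
  else st

def find_match (numbers : List Int) (valid_paths : List String) (id_by_path_row : List (String × Int × Int)) (rows_by_path : List (String × List (String × Int))) : Option String × List Int :=
  match numbers with
  | [] => (none, [])
  | n0 :: rest =>
    let sec := PySem.Int.toStr n0
    let st := (PySem.List.pyRange 0 ((rest.length : Int) + 1) 1).foldl
      (stepA valid_paths id_by_path_row rows_by_path sec rest) (none, none)
    match st.1 with
    | some b => (some b.1, b.2.1)
    | none =>
      match st.2 with
      | some b => (some b.1, b.2)
      | none => (none, [])

-- ===== PORT B =====
-- B's downward loop `for split in range(len(rest)-1, -1, -1)`: `altScan … k` tries the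
-- splits k-1, k-2, …, 0 in that order, returning at the first scenario match
-- (all indices handed to getD are in range by construction)
def altScan (valid_paths : List String) (id_by_path_row : List (String × Int × Int))
    (prefixes : List String) (rest : List Int) : Nat → Option (String × List Int)
  | 0 => none
  | k + 1 =>
    let path := prefixes.getD k ""
    if valid_paths.contains path then
      match getTag id_by_path_row path (rest.getD k 0) with
      | some tid =>
        if tid ≠ 0 then some (path, [tid])
        else altScan valid_paths id_by_path_row prefixes rest k
      | none => altScan valid_paths id_by_path_row prefixes rest k
    else altScan valid_paths id_by_path_row prefixes rest k

def find_match_alt (numbers : List Int) (valid_paths : List String) (id_by_path_row : List (String × Int × Int)) (rows_by_path : List (String × List (String × Int))) : Option String × List Int :=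
  match numbers with
  | [] => (none, [])
  | n0 :: rest =>
    let built := rest.foldl
      (fun (st : String × List String) n =>
        let cur := st.1 ++ "." ++ PySem.Int.toStr n
        (cur, st.2 ++ [cur]))
      (PySem.Int.toStr n0, [PySem.Int.toStr n0])
    match altScan valid_paths id_by_path_row built.2 rest rest.length with
    | some r => (some r.1, r.2)
    | none =>
      if valid_paths.contains built.1 then
        (some built.1, (getRows rows_by_path built.1).map (·.2))
      else (none, [])

-- ===== PRECONDITION & SPEC =====
def Spec_find_match (numbers : List Int) (valid_paths : List String) (id_by_path_row : List (String × Int × Int)) (rows_by_path : List (String × List (String × Int))) (out : Option String × List Int) : Prop := out = find_match_alt numbers valid_paths id_by_path_row rows_by_path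
instance (numbers : List Int) (valid_paths : List String) (id_by_path_row : List (String × Int × Int)) (rows_by_path : List (String × List (String × Int))) (out : Option String × List Int) : Decidable (Spec_find_match numbers valid_paths id_by_path_row rows_by_path out) := by unfold Spec_find_match; infer_instance

-- ===== CLAIM (what is proved, stated in full; the proofs are below) =====
def Claim_equal_find_match : Prop := ∀ (numbers : List Int) (valid_paths : List String) (id_by_path_row : List (String × Int × Int)) (rows_by_path : List (String × List (String × Int))), Dom_find_match numbers valid_paths id_by_path_row rows_by_path → Spec_find_match numbers valid_paths id_by_path_row rows_by_path (find_match numbers valid_paths id_by_path_row rows_by_path)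

-- ===== LEMMAS AND PROOFS =====

-- the dotted path for section string `sec` followed by the first k of `rest`
def pathAt (sec : String) (rest : List Int) (k : Nat) : String :=
  (rest.take k).foldl (fun s x => s ++ "." ++ PySem.Int.toStr x) sec

-- the scenario-match candidate at split k (some (path, [tag_id]) iff A's inner test fires)
def candAt (valid_paths : List String) (id_by_path_row : List (String × Int × Int))
    (sec : String) (rest : List Int) (k : Nat) : Option (String × List Int) :=
  if valid_paths.contains (pathAt sec rest k) then
    match getTag id_by_path_row (pathAt sec rest k) (rest.getD k 0) with
    | some tid => if tid ≠ 0 then some (pathAt sec rest k, [tid]) else none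
    | none => none
  else none

-- the deepest scenario match among splits < k, with its depth (A's best_with_scenario)
def bestD (valid_paths : List String) (id_by_path_row : List (String × Int × Int))
    (sec : String) (rest : List Int) : Nat → Option (String × List Int × Int)
  | 0 => none
  | k + 1 =>
    match candAt valid_paths id_by_path_row sec rest k with
    | some v => some (v.1, v.2, (k : Int) + 1)
    | none => bestD valid_paths id_by_path_row sec rest k

theorem icc (s a x : List Char) (l : List (List Char)) :
    List.intercalate s (a :: x :: l) = a ++ s ++ List.intercalate s (x :: l) := by
  simp [List.intercalate, List.intersperse_cons₂, List.append_assoc]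

theorem intercalate_absorb (s a x : List Char) (l : List (List Char)) :
    List.intercalate s ((a ++ s ++ x) :: l) = a ++ s ++ List.intercalate s (x :: l) := by
  cases l with
  | nil => simp [List.intercalate]
  | cons y ys => rw [icc, icc]; simp [List.append_assoc]

theorem join_cons_foldl (xs : List String) (a : String) :
    PySem.Str.join "." (a :: xs) = xs.foldl (fun s x => s ++ "." ++ x) a := by
  induction xs generalizing a with
  | nil =>
    apply String.toList_inj.mp
    simp [PySem.Str.toList_join, PySem.Chars.join, List.intercalate]
  | cons x xs ih =>
    have h : PySem.Str.join "." (a :: x :: xs) = PySem.Str.join "." ((a ++ "." ++ x) :: xs) := by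
      apply String.toList_inj.mp
      simp only [PySem.Str.toList_join, PySem.Chars.join, List.map_cons, String.toList_append]
      rw [icc, intercalate_absorb]
    rw [h, ih]
    rfl

theorem pathAt_eq_join (sec : String) (rest : List Int) (k : Nat) :
    PySem.Str.join "." (sec :: (rest.take k).map PySem.Int.toStr) = pathAt sec rest k := by
  rw [join_cons_foldl, pathAt, List.foldl_map]

theorem bestD_depth_le (vp : List String) (d : List (String × Int × Int)) (sec : String)
    (rest : List Int) (k : Nat) (b : String × List Int × Int)
    (h : bestD vp d sec rest k = some b) : b.2.2 ≤ (k : Int) := by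
  induction k with
  | zero => simp [bestD] at h
  | succ k ih =>
    rw [bestD] at h
    cases hc : candAt vp d sec rest k with
    | some v => rw [hc] at h; cases h; simp
    | none =>
      rw [hc] at h
      have := ih h
      push_cast
      omega

-- A's fold over splits 0..k-1 (k ≤ len rest): best_with_scenario = bestD, best_without = none
theorem foldA_eq_bestD (vp : List String) (d : List (String × Int × Int))
    (r : List (String × List (String × Int))) (sec : String) (rest : List Int) (k : Nat)
    (hk : k ≤ rest.length) :
    (PySem.List.pyRange 0 (k : Int) 1).foldl (stepA vp d r sec rest) (none, none)
      = (bestD vp d sec rest k, none) := by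
  induction k with
  | zero =>
    rw [show ((0 : Nat) : Int) = 0 from rfl, PySem.List.pyRange_one_eq_nil le_rfl]
    simp [bestD]
  | succ k ih =>
    have hk' : k ≤ rest.length := Nat.le_of_succ_le hk
    have hrange : PySem.List.pyRange 0 ((k : Int) + 1) 1
        = PySem.List.pyRange 0 (k : Int) 1 ++ [(k : Int)] := by
      exact PySem.List.pyRange_one_succ_right (Int.natCast_nonneg k)
    have : ((k + 1 : Nat) : Int) = (k : Int) + 1 := by push_cast; ring
    rw [this, hrange, List.foldl_append, ih hk']
    -- now one step at split = k
    rw [bestD]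
    have hpath : PySem.Str.join "."
        (sec :: (PySem.List.slice rest (some 0) (some (k : Int))).map PySem.Int.toStr)
        = pathAt sec rest k := by
      rw [PySem.List.slice_zero_start, PySem.List.slice_to_natCast, pathAt_eq_join]
    have hrem : PySem.List.slice rest (some (k : Int)) none = rest.drop k :=
      PySem.List.slice_from_natCast rest k
    have hklt : k < rest.length := hk
    have hdrop : rest.drop k = rest[k] :: rest.drop (k + 1) := List.drop_eq_getElem_cons hklt
    have hgetD : rest.getD k 0 = rest[k] := List.getD_eq_getElem rest 0 hklt
    have hdepth : ((sec :: (PySem.List.slice rest (some 0) (some (k : Int))).map PySem.Int.toStr).length : Int)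
        = (k : Int) + 1 := by
      rw [PySem.List.slice_zero_start, PySem.List.slice_to_natCast]
      simp [List.length_take, Nat.min_eq_left hk']
    simp only [List.foldl_cons, List.foldl_nil, stepA]
    simp only [hpath, hrem, hdrop, hdepth]
    rw [candAt]
    simp only [hgetD]
    by_cases hc : vp.contains (pathAt sec rest k)
    · simp only [hc, if_pos]
      cases ht : getTag d (pathAt sec rest k) rest[k] with
      | some tid =>
        by_cases htid : tid = 0
        · simp [htid]
        · simp only [htid, ne_eq, not_false_eq_true, if_true]
          cases hb : bestD vp d sec rest k with
          | none => simp
          | some b =>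
            have hle := bestD_depth_le vp d sec rest k b hb
            have hgt : ((k : Int) + 1) > b.2.2 := by omega
            simp [hgt]
      | none => simp
    · have hc' : pathAt sec rest k ∉ vp := by simpa using hc
      simp [hc']

-- B's prefix-building fold
theorem build_eq (rest : List Int) (c0 : String) (ps0 : List String) :
    rest.foldl (fun (st : String × List String) n =>
        let cur := st.1 ++ "." ++ PySem.Int.toStr n
        (cur, st.2 ++ [cur])) (c0, ps0)
      = (pathAt c0 rest rest.length,
         ps0 ++ (List.range rest.length).map (fun i => pathAt c0 rest (i + 1))) := by
  induction rest generalizing c0 ps0 with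
  | nil => simp [pathAt]
  | cons n t ih =>
    simp only [List.foldl_cons]
    rw [ih]
    have hp : ∀ j : Nat, pathAt (c0 ++ "." ++ PySem.Int.toStr n) t j = pathAt c0 (n :: t) (j + 1) := by
      intro j; simp [pathAt]
    simp only [Prod.mk.injEq]
    constructor
    · simp [pathAt]
    · simp only [List.length_cons]
      rw [List.range_succ_eq_map]
      simp only [List.map_cons, List.map_map]
      rw [List.append_assoc]
      simp [Function.comp, pathAt]
-- B's prefixes list evaluated at i < len rest
theorem prefixes_getD (c0 : String) (rest : List Int) (i : Nat) (hi : i < rest.length) :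
    (c0 :: (List.range rest.length).map (fun j => pathAt c0 rest (j + 1))).getD i ""
      = pathAt c0 rest i := by
  cases i with
  | zero => simp [pathAt]
  | succ j =>
    have hj : j < rest.length := by omega
    simp [List.getD_eq_getElem?_getD, List.getElem?_range hj]

-- B's downward scan = deepest match
theorem altScan_eq_bestD (vp : List String) (d : List (String × Int × Int)) (c0 : String)
    (rest : List Int) (prefixes : List String) (k : Nat) (hk : k ≤ rest.length)
    (hpre : ∀ i, i < k → prefixes.getD i "" = pathAt c0 rest i) :
    altScan vp d prefixes rest k
      = (bestD vp d c0 rest k).map (fun b => (b.1, b.2.1)) := by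
  induction k with
  | zero => simp [altScan, bestD]
  | succ k ih =>
    have ihk := ih (Nat.le_of_succ_le hk) (fun i hik => hpre i (Nat.lt_succ_of_lt hik))
    rw [altScan, bestD]
    have hpk := hpre k (Nat.lt_succ_self k)
    simp only [hpk]
    rw [candAt]
    by_cases hc : vp.contains (pathAt c0 rest k)
    · simp only [hc, if_pos]
      cases ht : getTag d (pathAt c0 rest k) (rest.getD k 0) with
      | some tid =>
        by_cases htid : tid = 0
        · simp [htid, ihk]
        · simp [htid]
      | none => simp [ihk]
    · have hc' : pathAt c0 rest k ∉ vp := by simpa using hc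
      simp [hc', ihk]

-- ===== VERDICT (by name: the statement is the Claim_ definition above) =====
theorem find_match_spec : Claim_equal_find_match := by
  intro numbers vp d r _
  unfold Spec_find_match
  cases numbers with
  | nil => rfl
  | cons n0 rest =>
    simp only [find_match, find_match_alt]
    rw [build_eq]
    have hrange : PySem.List.pyRange 0 ((rest.length : Int) + 1)
        = PySem.List.pyRange 0 (rest.length : Int) ++ [(rest.length : Int)] :=
      PySem.List.pyRange_one_succ_right (Int.natCast_nonneg rest.length)
    rw [hrange, List.foldl_append,
      foldA_eq_bestD vp d r (PySem.Int.toStr n0) rest rest.length le_rfl]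
    simp only [List.foldl_cons, List.foldl_nil, stepA]
    have hpath : PySem.Str.join "."
        (PySem.Int.toStr n0 :: (PySem.List.slice rest (some 0) (some (rest.length : Int))).map PySem.Int.toStr)
        = pathAt (PySem.Int.toStr n0) rest rest.length := by
      rw [PySem.List.slice_zero_start, PySem.List.slice_to_natCast, pathAt_eq_join]
    have hrem : PySem.List.slice rest (some (rest.length : Int)) none = ([] : List Int) := by
      rw [PySem.List.slice_from_natCast, List.drop_length]
    have hscan : altScan vp d (pathAt (PySem.Int.toStr n0) rest 0 ::
          (List.range rest.length).map (fun i => pathAt (PySem.Int.toStr n0) rest (i + 1)))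
          rest rest.length
        = (bestD vp d (PySem.Int.toStr n0) rest rest.length).map (fun b => (b.1, b.2.1)) :=
      altScan_eq_bestD vp d (PySem.Int.toStr n0) rest _ rest.length le_rfl
        (fun i hi => prefixes_getD (PySem.Int.toStr n0) rest i hi)
    have hp0 : pathAt (PySem.Int.toStr n0) rest 0 = PySem.Int.toStr n0 := by simp [pathAt]
    rw [hp0] at hscan
    simp only [hpath, hrem, List.singleton_append, hscan]
    by_cases hfull : pathAt (PySem.Int.toStr n0) rest rest.length ∈ vp
    · cases hb : bestD vp d (PySem.Int.toStr n0) rest rest.length with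
      | none => simp [hfull]
      | some b => simp [hfull]
    · have hfull' : ¬ (pathAt (PySem.Int.toStr n0) rest rest.length ∈ vp) := hfull
      cases hb : bestD vp d (PySem.Int.toStr n0) rest rest.length with
      | none => simp [hfull']
      | some b => simp [hfull']
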